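-- pv_equiv track=rewrite | github.com/Derfador1/treatment | residential.py | is_undulant
-- ===== SOURCE A (Python) =====
-- def is_undulant(n):
-- 	digits = [int(i) for i in list(str(n))]
-- 	diffs = []
-- 	for i in range(len(digits) - 1):
-- 		diffs.append((digits[i] > digits[i+1]) - (digits[i] < digits[i+1]))
-- 	if len(diffs) == 1:
-- 	   if diffs[0] == 0:
-- 		   return False
-- 	else:
-- 	   for i in range(len(diffs) - 1):
-- 		   if diffs[i] * diffs[i+1] != -1:
-- 		       return False
-- 	return True
-- ===== SOURCE B (Python) =====
-- def is_undulant(n):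
--     digits = [int(c) for c in str(n)]
--     prev_dir = None
--     for i in range(1, len(digits)):
--         if digits[i] == digits[i - 1]:
--             return False
--         up = digits[i] > digits[i - 1]
--         if prev_dir is not None and prev_dir == up:
--             return False
--         prev_dir = up
--     return True
-- ===== Notes on version B (the rewrite author's own statement) =====
-- stated objective: simpler
-- what changed: Replaces the intermediate diffs list plus two separate checks (the len==1 special case and the pairwise-product loop) with one single pass over the digits that tracks the previous direction as a boolean.
import Mathlib
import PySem

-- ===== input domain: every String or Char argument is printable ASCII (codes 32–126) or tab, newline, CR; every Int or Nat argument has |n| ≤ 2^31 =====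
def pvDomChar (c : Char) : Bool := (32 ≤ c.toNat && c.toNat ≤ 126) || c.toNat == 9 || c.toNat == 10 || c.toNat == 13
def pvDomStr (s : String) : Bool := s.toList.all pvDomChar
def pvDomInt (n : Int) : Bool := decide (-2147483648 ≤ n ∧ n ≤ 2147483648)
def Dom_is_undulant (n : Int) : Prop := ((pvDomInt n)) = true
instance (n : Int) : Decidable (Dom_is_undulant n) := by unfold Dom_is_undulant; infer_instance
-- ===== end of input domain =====

-- B replaces A's intermediate diffs list and its two separate checks (len==1 special case +
-- pairwise-product loop) with one single pass over the digits tracking the previous direction.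


-- ===== PORT A =====
-- digits = [int(i) for i in list(str(n))]  (shared line of both Pythons).
-- int(i) is PySem.Int.ofChars? on the one-char string; under Pre_ (0 ≤ n) every character of
-- str(n) is a digit so the conversion is `some`; the `.getD 0` default is never reached there.
def pvDigits (n : Int) : List Int :=
  (PySem.Int.toChars n).map (fun c => (PySem.Int.ofChars? [c]).getD 0)

-- for i in range(len(digits)-1): diffs.append((digits[i] > digits[i+1]) - (digits[i] < digits[i+1]))
-- ported as the obvious structural recursion over the same adjacent pairs
def pvDiffs : List Int → List Int
  | a :: b :: r =>
      ((if a > b then (1 : Int) else 0) - (if a < b then 1 else 0)) :: pvDiffs (b :: r)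
  | _ => []

-- for i in range(len(diffs)-1): if diffs[i]*diffs[i+1] != -1: return False
def pvPairChk : List Int → Bool
  | a :: b :: r => if a * b ≠ -1 then false else pvPairChk (b :: r)
  | _ => true

def is_undulant (n : Int) : Bool :=
  let diffs := pvDiffs (pvDigits n)
  if diffs.length = 1 then
    (if diffs.headD 0 = 0 then false else true)
  else
    pvPairChk diffs

-- ===== PORT B =====
-- single pass: prev digit p, previously seen direction dir (None before the first step)
def pvScan : Int → Option Bool → List Int → Bool
  | _, _, [] => true
  | p, dir, d :: r =>
    if d = p then false
    else
      let up := decide (d > p)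
      match dir with
      | some u => if u = up then false else pvScan d (some up) r
      | none => pvScan d (some up) r

def is_undulant_alt (n : Int) : Bool :=
  match pvDigits n with
  | [] => true
  | d :: r => pvScan d none r

-- ===== PRECONDITION & SPEC =====
-- Pre_ excludes exactly the inputs where both Pythons raise ValueError: for n < 0, str(n)
-- starts with '-' and int('-') raises (in both A and B identically).
def Pre_is_undulant (n : Int) : Prop := 0 ≤ n
instance (n : Int) : Decidable (Pre_is_undulant n) := by unfold Pre_is_undulant; infer_instance
def pvWitness_is_undulant : Int := 132

def Spec_is_undulant (n : Int) (out : Bool) : Prop := out = is_undulant_alt n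
instance (n : Int) (out : Bool) : Decidable (Spec_is_undulant n out) := by unfold Spec_is_undulant; infer_instance

-- ===== CLAIM (what is proved, stated in full; the proofs are below) =====
def Claim_equal_is_undulant : Prop := ∀ (n : Int), Dom_is_undulant n → Pre_is_undulant n → Spec_is_undulant n (is_undulant n)

-- ===== LEMMAS AND PROOFS =====

-- after the first step (previous digit d, current e, d ≠ e) the scan agrees with the pairwise check
lemma pvScan_eq_pvPairChk (r : List Int) : ∀ (d e : Int), d ≠ e →
    pvScan e (some (decide (e > d))) r = pvPairChk (pvDiffs (d :: e :: r)) := by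
  induction r with
  | nil =>
      intro d e _
      simp [pvScan, pvDiffs, pvPairChk]
  | cons f r' ih =>
      intro d e hde
      by_cases hfe : f = e
      · subst hfe
        simp only [pvScan, pvDiffs, pvPairChk, lt_irrefl, gt_iff_lt, if_false]
        norm_num
      · have hIH := ih e f (fun h => hfe h.symm)
        simp only [pvScan, pvDiffs, pvPairChk, if_neg hfe] at *
        rcases lt_trichotomy d e with h1 | h1 | h1
        · rcases lt_trichotomy e f with h2 | h2 | h2
          · -- up, up : B stops; A's product is 1
            have a1 : ¬ d > e := by omega
            have a2 : ¬ e > f := by omega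
            simp only [gt_iff_lt, a1, a2, h1, h2, if_true, if_false, decide_true]
            norm_num
          · exact absurd h2.symm hfe
          · -- up, down : both continue
            have a1 : ¬ d > e := by omega
            have a2 : ¬ f > e := by omega
            simp only [gt_iff_lt, a1, a2, h1, h2, decide_true, decide_false] at hIH ⊢
            norm_num [hIH]
        · exact absurd h1 hde
        · rcases lt_trichotomy e f with h2 | h2 | h2
          · -- down, up : both continue
            have a1 : ¬ d < e := by omega
            have a2 : ¬ f < e := by omega
            simp only [gt_iff_lt, a1, a2, h1, h2, decide_true, decide_false] at hIH ⊢
            norm_num [hIH]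
          · exact absurd h2.symm hfe
          · -- down, down : B stops; A's product is 1
            have a1 : ¬ d < e := by omega
            have a2 : ¬ e < f := by omega
            simp only [gt_iff_lt, a1, a2, h1, h2, if_true, if_false, decide_false]
            norm_num

-- the whole comparison, as a statement about an arbitrary digit list
lemma check_eq (ds : List Int) :
    (let diffs := pvDiffs ds
     if diffs.length = 1 then (if diffs.headD 0 = 0 then false else true) else pvPairChk diffs) =
    (match ds with
     | [] => true
     | d :: r => pvScan d none r) := by
  match ds with
  | [] => simp [pvDiffs, pvPairChk]
  | [d] => simp [pvDiffs, pvPairChk, pvScan]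
  | d :: e :: r =>
    by_cases hde : e = d
    · subst hde
      rcases r with _ | ⟨f, r'⟩
      · simp [pvDiffs, pvScan]
      · simp only [pvDiffs, pvScan, List.length_cons, pvPairChk,
          lt_irrefl, gt_iff_lt, if_false]
        norm_num
    · have hkey := pvScan_eq_pvPairChk r d e (fun h => hde h.symm)
      have hsc : pvScan d none (e :: r) = pvScan e (some (decide (e > d))) r := by
        simp [pvScan, hde]
      show (if (pvDiffs (d :: e :: r)).length = 1 then _ else _) = pvScan d none (e :: r)
      rw [hsc, hkey]
      rcases r with _ | ⟨f, r'⟩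
      · have hd : d < e ∨ e < d := by
          rcases lt_trichotomy d e with h | h | h
          · exact Or.inl h
          · exact absurd h.symm hde
          · exact Or.inr h
        rcases hd with hd | hd <;>
          · have : ¬ (((if d > e then (1:Int) else 0) - if d < e then 1 else 0) = 0) := by
              have a1 : (d > e) ↔ (e < d) := Iff.rfl
              by_cases h : d > e <;> by_cases h' : d < e <;> simp_all <;> omega
            simp [pvDiffs, pvPairChk, this]
      · have hlen : (pvDiffs (d :: e :: f :: r')).length ≠ 1 := by
          simp [pvDiffs]
        rw [if_neg hlen]

-- ===== VERDICT (by name: the statement is the Claim_ definition above) =====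
theorem is_undulant_spec : Claim_equal_is_undulant := by
  intro n _ _
  show is_undulant n = is_undulant_alt n
  unfold is_undulant is_undulant_alt
  exact check_eq (pvDigits n)
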